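-- pv_equiv track=rewrite | github.com/wwwwww-kg/world-airports | main/views.py | process_runways
-- ===== SOURCE A (Python) =====
-- def process_runways(runways_data):
--     runways = runways_data.split(";")
--     processed_runways = []
--
--     if runways_data == "- - - - - -":
--         return []
--
--     for runway in runways:
--         # Split each runway data by space
--         runway_params = runway.split(" ")
--
--         # Create a dictionary for each runway
--         runway_dict = {
--             "length": runway_params[0] if len(runway_params) > 0 else "-",
--             "width": runway_params[1] if len(runway_params) > 1 else "-",
--             "surfaceType": runway_params[2] if len(runway_params) > 2 else "-",
--             "isLighted": runway_params[3] if len(runway_params) > 3 else "-",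
--             "isClosed": runway_params[4] if len(runway_params) > 4 else "-",
--             "lowerIdent": runway_params[5] if len(runway_params) > 5 else "-",
--         }
--
--         # Add the dictionary to the list of processed runways
--         processed_runways.append(runway_dict)
--
--     return processed_runways
-- ===== SOURCE B (Python) =====
-- def process_runways(runways_data):
--     # Single pass over the characters: a ' ' closes the current field, a ';'
--     # closes the current runway; no calls to str.split at all.
--     if runways_data == "- - - - - -":
--         return []
--     keys = ["length", "width", "surfaceType", "isLighted", "isClosed", "lowerIdent"]
--     tok = ""
--     fields = []
--     out = []
--     for ch in runways_data + ";":
--         if ch == ";":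
--             out.append(dict(zip(keys, fields + [tok] + ["-"] * 6)))
--             tok, fields = "", []
--         elif ch == " ":
--             fields.append(tok)
--             tok = ""
--         else:
--             tok += ch
--     return out
-- ===== Notes on version B (the rewrite author's own statement) =====
-- stated objective: alternative
-- what changed: Replaces A's two-level split (first on semicolons, then each runway on spaces, with six index-guarded ternaries per runway) with a single left-to-right character state machine that closes a field on a space, emits a runway dict on a semicolon, and never calls str.split.
import Mathlib
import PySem

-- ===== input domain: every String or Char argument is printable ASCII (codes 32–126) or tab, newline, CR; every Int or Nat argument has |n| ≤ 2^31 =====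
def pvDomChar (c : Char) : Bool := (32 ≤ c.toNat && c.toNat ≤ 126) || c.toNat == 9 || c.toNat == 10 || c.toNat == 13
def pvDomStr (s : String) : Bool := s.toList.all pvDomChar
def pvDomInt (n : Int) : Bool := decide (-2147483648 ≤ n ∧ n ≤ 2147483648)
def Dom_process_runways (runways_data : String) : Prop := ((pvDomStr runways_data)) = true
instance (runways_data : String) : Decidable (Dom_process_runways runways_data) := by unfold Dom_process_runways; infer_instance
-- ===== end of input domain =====

-- B replaces A's split-on-';'-then-split-on-' ' passes with a single character-level
-- state machine over the input (no str.split at all); objective: alternative.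

-- ===== PORT A =====
-- runway_params[i] if len(runway_params) > i else "-"
def pvParamOr (p : List String) (i : Nat) : String :=
  if p.length > i then p.getD i "-" else "-"

-- s.split(sep) for nonempty sep (PySem.Chars.splitOn is the sep != "" form of str.split)
def pySplit (s sep : String) : List String :=
  (PySem.Chars.splitOn s.toList sep.toList).map String.ofList

-- dict literal with six distinct keys = six-pair assoc list in insertion order
def process_runways (runways_data : String) : List (List (String × String)) :=
  let runways := pySplit runways_data ";"
  let processed_runways : List (List (String × String)) := []
  if runways_data = "- - - - - -" then [] else
  runways.foldl (fun acc runway =>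
    let runway_params := pySplit runway " "
    let runway_dict : List (String × String) :=
      [("length", pvParamOr runway_params 0),
       ("width", pvParamOr runway_params 1),
       ("surfaceType", pvParamOr runway_params 2),
       ("isLighted", pvParamOr runway_params 3),
       ("isClosed", pvParamOr runway_params 4),
       ("lowerIdent", pvParamOr runway_params 5)]
    acc ++ [runway_dict]) processed_runways

-- ===== PORT B =====
def pvKeys : List String := ["length", "width", "surfaceType", "isLighted", "isClosed", "lowerIdent"]

-- one step of Source B's character scanner; the growing token tok is kept as its char list
-- (PySem convention: Python str ops are exact on List Char); dict(zip(keys, ...)) with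
-- six distinct keys = the zip as an assoc list (zip truncates exactly like Python's)
def pvStepB (st : List Char × List String × List (List (String × String))) (ch : Char) :
    List Char × List String × List (List (String × String)) :=
  match st with
  | (tok, fields, out) =>
    if ch = ';' then
      ([], [], out ++ [pvKeys.zip (fields ++ [String.ofList tok] ++ ["-", "-", "-", "-", "-", "-"])])
    else if ch = ' ' then ([], fields ++ [String.ofList tok], out)
    else (tok ++ [ch], fields, out)

-- for ch in runways_data + ";": ... ; return out
def process_runways_alt (runways_data : String) : List (List (String × String)) :=
  if runways_data = "- - - - - -" then [] else
  ((runways_data.toList ++ [';']).foldl pvStepB ([], [], [])).2.2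

-- ===== PRECONDITION & SPEC =====
def Spec_process_runways (runways_data : String) (out : List (List (String × String))) : Prop := out = process_runways_alt runways_data
instance (runways_data : String) (out : List (List (String × String))) : Decidable (Spec_process_runways runways_data out) := by unfold Spec_process_runways; infer_instance

-- ===== CLAIM (what is proved, stated in full; the proofs are below) =====
def Claim_equal_process_runways : Prop := ∀ (runways_data : String), Dom_process_runways runways_data → Spec_process_runways runways_data (process_runways runways_data)

-- ===== LEMMAS AND PROOFS =====

theorem pvModifyHead_id {α : Type} (l : List α) : l.modifyHead (fun x => x) = l := by
  cases l <;> rfl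

-- PySem's fueled splitOn on a one-char separator is Mathlib's List.splitOn
theorem pvGo (c : Char) : ∀ (fuel : Nat) (l cur : List Char) (acc : List (List Char)), l.length < fuel →
    PySem.Chars.splitOn.go [c] fuel l cur acc
      = acc.reverse ++ (List.splitOn c l).modifyHead (cur.reverse ++ ·) := by
  intro fuel
  induction fuel with
  | zero => intro l cur acc h; omega
  | succ f ih =>
    intro l cur acc h
    cases l with
    | nil =>
      rw [PySem.Chars.splitOn.go.eq_def]
      simp [List.splitOn, List.splitOnP, List.splitOnP.go]
    | cons d r =>
      rw [PySem.Chars.splitOn.go.eq_def]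
      by_cases hd : d = c
      · subst hd
        simp only [List.isPrefixOf, BEq.rfl, Bool.true_and, if_pos]
        rw [ih _ _ _ (by simpa using Nat.lt_of_succ_lt_succ h)]
        simp [List.splitOn, List.splitOnP_cons, pvModifyHead_id]
      · have hpre : ([c].isPrefixOf (d :: r)) = false := by
          simp [List.isPrefixOf]; exact fun hh => absurd hh.symm hd
        simp only [hpre, Bool.false_eq_true, if_false]
        rw [ih _ _ _ (by simpa using Nat.lt_of_succ_lt_succ h)]
        have hpc : ((d == c) = false) := by simp [hd]
        simp only [List.splitOn, List.splitOnP_cons, hpc, Bool.false_eq_true, if_false]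
        rcases hsp : List.splitOnP (· == c) r with _ | ⟨hh, tt⟩
        · exact absurd hsp (List.splitOnP_ne_nil _ r)
        · simp

theorem pvSplitOn_single (c : Char) (cs : List Char) :
    PySem.Chars.splitOn cs [c] = List.splitOn c cs := by
  rw [PySem.Chars.splitOn, pvGo c _ _ _ _ (Nat.lt_succ_self _)]
  simp [pvModifyHead_id]

-- the six-key dict of A as a function of the field list
def pvDictB (fields : List String) : List (String × String) :=
  pvKeys.zip (fields ++ ["-", "-", "-", "-", "-", "-"])

def pvMkRunway (r : List Char) : List (String × String) :=
  pvDictB ((List.splitOn ' ' r).map String.ofList)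

-- the dicts B's scanner emits from state (fields, tok) over the remaining characters
def pvEmit : List String → List Char → List Char → List (List (String × String))
  | _, _, [] => []
  | fields, tok, d :: r =>
    if d = ';' then pvDictB (fields ++ [String.ofList tok]) :: pvEmit [] [] r
    else if d = ' ' then pvEmit (fields ++ [String.ofList tok]) [] r
    else pvEmit fields (tok ++ [d]) r

theorem pvFoldB (cs : List Char) : ∀ (tok : List Char) (fields : List String)
    (out : List (List (String × String))),
    ((cs.foldl pvStepB (tok, fields, out))).2.2 = out ++ pvEmit fields tok cs := by
  induction cs with
  | nil => intro tok fields out; simp [pvEmit]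
  | cons d r ih =>
    intro tok fields out
    simp only [List.foldl_cons, pvStepB, pvEmit]
    split_ifs with h1 h2 <;> simp [ih, pvDictB]

-- A's per-dict ternaries = the zip over the padded field list
theorem pvDict_eq (p : List String) :
    [("length", pvParamOr p 0), ("width", pvParamOr p 1), ("surfaceType", pvParamOr p 2),
     ("isLighted", pvParamOr p 3), ("isClosed", pvParamOr p 4), ("lowerIdent", pvParamOr p 5)]
    = pvDictB p := by
  match p with
  | [] => rfl
  | [a] => rfl
  | [a, b] => rfl
  | [a, b, c] => rfl
  | [a, b, c, d] => rfl
  | [a, b, c, d, e] => rfl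
  | a :: b :: c :: d :: e :: f :: rest =>
    simp [pvParamOr, pvKeys, pvDictB, List.getD]

-- what the scanner emits over cs ++ [';'] in terms of the two-level split of cs
theorem pvEmit_split (cs : List Char) : ∀ (fields : List String) (tok : List Char),
    pvEmit fields tok (cs ++ [';'])
      = pvDictB (fields ++ (((List.splitOn ' ' (List.splitOn ';' cs).headI).modifyHead
          (tok ++ ·)).map String.ofList))
        :: ((List.splitOn ';' cs).tail).map pvMkRunway := by
  induction cs with
  | nil =>
    intro fields tok
    simp [pvEmit, List.splitOn, List.splitOnP, List.splitOnP.go]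
  | cons d r ih =>
    intro fields tok
    rcases hsp : List.splitOnP (· == ';') r with _ | ⟨hh, tt⟩
    · exact absurd hsp (List.splitOnP_ne_nil _ r)
    by_cases h1 : d = ';'
    · subst h1
      simp only [List.cons_append, pvEmit, ih, List.splitOn, List.splitOnP_cons,
        BEq.rfl, if_pos, hsp]
      simp [pvMkRunway, pvModifyHead_id, List.splitOn]
    · have hpc : ((d == ';') = false) := by simp [h1]
      by_cases h2 : d = ' '
      · subst h2
        simp only [List.cons_append, pvEmit, if_neg (show (' ' : Char) ≠ ';' by decide), ih]
        simp only [List.splitOn, List.splitOnP_cons, hpc, Bool.false_eq_true, if_false, hsp]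
        rcases hsp2 : List.splitOnP (· == ' ') hh with _ | ⟨gg, ss⟩
        · exact absurd hsp2 (List.splitOnP_ne_nil _ hh)
        simp [hsp2]
      · simp only [List.cons_append, pvEmit, if_neg h1, if_neg h2, ih]
        simp only [List.splitOn, List.splitOnP_cons, hpc, Bool.false_eq_true, if_false, hsp]
        have hpc2 : ((d == ' ') = false) := by simp [h2]
        rcases hsp2 : List.splitOnP (· == ' ') hh with _ | ⟨gg, ss⟩
        · exact absurd hsp2 (List.splitOnP_ne_nil _ hh)
        simp [hsp2, hpc2]

-- ===== VERDICT (by name: the statement is the Claim_ definition above) =====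
theorem process_runways_spec : Claim_equal_process_runways := by
  intro s _
  unfold Spec_process_runways process_runways process_runways_alt
  split
  · rfl
  · simp only [PySem.List.foldl_append_singleton_eq_map, List.nil_append,
      pvFoldB, pvEmit_split]
    rcases hsp : List.splitOn ';' s.toList with _ | ⟨hh, tt⟩
    · exact absurd hsp (List.splitOnP_ne_nil _ s.toList)
    simp [pySplit, pvSplitOn_single, hsp, pvMkRunway, pvModifyHead_id,
      Function.comp, pvDict_eq]
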